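-- pv_equiv track=rewrite | github.com/llouis0622/AI_Everything | 1. 기초 수학 및 프로그래밍/1. 수학 기초/1. 선형대수학/11. 선형대수 적용/linear_algebra.py | u_bidiag
-- ===== SOURCE A (Python) =====
-- def u_bidiag(A):
--     n = len(A)
--     p = len(A[0])
--     res = []
--     for i in range(n):
--         row = []
--         for j in range(p):
--             if i > j or j - i > 1:
--                 row.append(0)
--             else:
--                 row.append(A[i][j])
--         res.append(row)
--     return res
-- ===== SOURCE B (Python) =====
-- def u_bidiag(A):
--     n = len(A)
--     p = len(A[0])
--     res = [[0] * p for _ in range(n)]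
--     for i in range(n):
--         if i < p:
--             res[i][i] = A[i][i]
--         if i + 1 < p:
--             res[i][i + 1] = A[i][i + 1]
--     return res
-- ===== Notes on version B (the rewrite author's own statement) =====
-- stated objective: simpler
-- what changed: B allocates an all-zero n x p matrix and then writes only the two band entries per row, removing A's inner column loop with its keep/zero branch over every cell.
import Mathlib
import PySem

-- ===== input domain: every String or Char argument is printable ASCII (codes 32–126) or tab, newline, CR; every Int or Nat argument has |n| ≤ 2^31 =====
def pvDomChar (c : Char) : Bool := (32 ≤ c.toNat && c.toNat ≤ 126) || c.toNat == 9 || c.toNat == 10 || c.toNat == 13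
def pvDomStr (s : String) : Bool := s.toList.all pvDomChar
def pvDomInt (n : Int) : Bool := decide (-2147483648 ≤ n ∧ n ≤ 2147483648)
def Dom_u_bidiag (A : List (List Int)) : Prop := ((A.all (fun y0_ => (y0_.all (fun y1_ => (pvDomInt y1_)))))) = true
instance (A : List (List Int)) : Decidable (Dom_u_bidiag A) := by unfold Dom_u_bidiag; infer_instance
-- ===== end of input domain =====

-- B builds a zero matrix and writes only the two band entries per row, replacing A's cell-by-cell keep/zero branch (objective: simpler).


-- ===== PORT A =====
-- literal transliteration of A: for each i, build the row cell by cell, branching keep/zero.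
def u_bidiag (A : List (List Int)) : List (List Int) :=
  let n := A.length
  let p := (A.headD []).length   -- len(A[0]); A = [] raises in Python and is excluded by Pre_
  (List.range n).foldl (fun res i =>
    res ++ [(List.range p).foldl (fun row j =>
      row ++ [if i > j ∨ j - i > 1 then (0 : Int)
              else (A.getD i []).getD j 0]) []]) []

-- ===== PORT B =====
-- in-place update of row i of res: res[i][i] = A[i][i] (if i < p), res[i][i+1] = A[i][i+1] (if i+1 < p)
def rowUpd (A : List (List Int)) (p i : ℕ) (r : List Int) : List Int :=
  let r := if i < p then r.set i ((A.getD i []).getD i 0) else r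
  if i + 1 < p then r.set (i + 1) ((A.getD i []).getD (i + 1) 0) else r

def u_bidiag_alt (A : List (List Int)) : List (List Int) :=
  let n := A.length
  let p := (A.headD []).length
  (List.range n).foldl (fun res i => res.set i (rowUpd A p i (res.getD i [])))
    (List.replicate n (List.replicate p (0 : Int)))

-- ===== PRECONDITION & SPEC =====
-- Pre_ excludes exactly the inputs where the Python raises IndexError: the empty matrix (len(A[0]))
-- and matrices whose row i is too short for the band accesses A[i][i] / A[i][i+1] that both programs make.
def Pre_u_bidiag (A : List (List Int)) : Prop :=
  A ≠ [] ∧ ∀ i ∈ List.range A.length,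
    (i < (A.headD []).length → i < (A.getD i []).length) ∧
    (i + 1 < (A.headD []).length → i + 1 < (A.getD i []).length)
instance (A : List (List Int)) : Decidable (Pre_u_bidiag A) := by unfold Pre_u_bidiag; infer_instance
def pvWitness_u_bidiag : List (List Int) := [[1, 2], [3, 4]]
def Spec_u_bidiag (A : List (List Int)) (out : List (List Int)) : Prop := out = u_bidiag_alt A
instance (A : List (List Int)) (out : List (List Int)) : Decidable (Spec_u_bidiag A out) := by unfold Spec_u_bidiag; infer_instance

-- ===== CLAIM (what is proved, stated in full; the proofs are below) =====
def Claim_equal_u_bidiag : Prop := ∀ (A : List (List Int)), Dom_u_bidiag A → Pre_u_bidiag A → Spec_u_bidiag A (u_bidiag A)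

-- ===== LEMMAS AND PROOFS =====

theorem foldl_append_singleton {α β : Type} (f : α → β) :
    ∀ (l : List α) (acc : List β),
      l.foldl (fun r j => r ++ [f j]) acc = acc ++ l.map f := by
  intro l
  induction l with
  | nil => simp
  | cons x xs ih => intro acc; simp [List.foldl, ih]

theorem u_bidiag_eq_map (A : List (List Int)) :
    u_bidiag A = (List.range A.length).map (fun i =>
      (List.range (A.headD []).length).map (fun j =>
        if i > j ∨ j - i > 1 then (0 : Int) else (A.getD i []).getD j 0)) := by
  simp only [u_bidiag, foldl_append_singleton, List.nil_append]

-- the row-by-row description of B's fold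
def updFrom (A : List (List Int)) (p : ℕ) : ℕ → List (List Int) → List (List Int)
  | _, [] => []
  | k, r :: rs => rowUpd A p k r :: updFrom A p (k + 1) rs

theorem foldl_set_eq_updFrom (A : List (List Int)) (p : ℕ) :
    ∀ (rest done : List (List Int)),
      (List.range' done.length rest.length).foldl
        (fun res i => res.set i (rowUpd A p i (res.getD i []))) (done ++ rest)
      = done ++ updFrom A p done.length rest := by
  intro rest
  induction rest with
  | nil => intro done; simp [updFrom]
  | cons r rs ih =>
    intro done
    have hget : (done ++ r :: rs).getD done.length [] = r := by
      simp [List.getD]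
    have hset : ∀ x, (done ++ r :: rs).set done.length x = done ++ x :: rs := by
      intro x
      rw [List.set_append_right _ _ (Nat.le_refl done.length)]
      simp
    simp only [List.length_cons]
    rw [List.range'_succ, List.foldl_cons, hget, hset]
    have h := ih (done ++ [rowUpd A p done.length r])
    simp only [List.length_append, List.length_cons, List.length_nil, Nat.zero_add, List.append_assoc, List.cons_append, List.nil_append] at h
    rw [h]
    simp [updFrom]

theorem updFrom_replicate (A : List (List Int)) (p : ℕ) (zr : List Int) :
    ∀ (m k : ℕ), updFrom A p k (List.replicate m zr)
      = (List.range' k m).map (fun i => rowUpd A p i zr) := by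
  intro m
  induction m with
  | zero => intro k; simp [updFrom]
  | succ m ih => intro k; simp [List.replicate_succ, updFrom, List.range'_succ, ih]

theorem u_bidiag_alt_eq_map (A : List (List Int)) :
    u_bidiag_alt A = (List.range A.length).map (fun i =>
      rowUpd A (A.headD []).length i (List.replicate (A.headD []).length 0)) := by
  have h := foldl_set_eq_updFrom A (A.headD []).length
      (List.replicate A.length (List.replicate (A.headD []).length 0)) []
  simp only [List.nil_append, List.length_nil, List.length_replicate] at h
  simp only [u_bidiag_alt, h, updFrom_replicate, List.range_eq_range']

theorem rowUpd_replicate (A : List (List Int)) (p i : ℕ) :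
    rowUpd A p i (List.replicate p 0)
      = (List.range p).map (fun j =>
          if i > j ∨ j - i > 1 then (0 : Int) else (A.getD i []).getD j 0) := by
  apply List.ext_getElem
  · simp [rowUpd]; split_ifs <;> simp
  · intro j h1 h2
    simp only [List.getElem_map, List.getElem_range]
    unfold rowUpd
    simp only []
    split_ifs with hb ha ha <;>
      simp_all [List.getElem_set, List.getElem_replicate] <;>
      (try split_ifs) <;> simp_all <;> omega

-- ===== VERDICT (by name: the statement is the Claim_ definition above) =====
theorem u_bidiag_spec : Claim_equal_u_bidiag := by
  intro A _ _
  unfold Spec_u_bidiag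
  rw [u_bidiag_eq_map, u_bidiag_alt_eq_map]
  exact List.map_congr_left (fun i _ => (rowUpd_replicate A _ i).symm)
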